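-- pv_equiv track=rewrite | github.com/Andy-F18/Tablatures | tableV2.py | createDoights
-- ===== SOURCE A (Python) =====
-- def createDoights(n):
--     doight = ""
--     for i in range(0, 6):
--         if i == n:
--             doight += "1"
--         else:
--             doight += "0"
--
--     return doight
-- ===== SOURCE B (Python) =====
-- def createDoights(n):
--     if 0 <= n < 6:
--         return "0" * n + "1" + "0" * (5 - n)
--     return "000000"
-- ===== Notes on version B (the rewrite author's own statement) =====
-- stated objective: simpler
-- what changed: Replaces the character-by-character loop with a closed-form string concatenation placing the single '1' at position n, and the all-zeros string when n is out of range.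
import Mathlib
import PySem

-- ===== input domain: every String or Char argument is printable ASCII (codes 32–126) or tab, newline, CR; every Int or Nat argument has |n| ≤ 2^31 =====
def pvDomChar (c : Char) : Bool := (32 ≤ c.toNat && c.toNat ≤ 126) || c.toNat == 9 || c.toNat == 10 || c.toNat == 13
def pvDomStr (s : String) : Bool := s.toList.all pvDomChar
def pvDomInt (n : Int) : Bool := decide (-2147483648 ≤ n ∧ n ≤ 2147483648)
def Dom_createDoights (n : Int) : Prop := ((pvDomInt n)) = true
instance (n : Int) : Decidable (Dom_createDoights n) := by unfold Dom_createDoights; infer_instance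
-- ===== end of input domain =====

-- B replaces the 6-step loop with a closed-form concatenation placing '1' at index n (simpler).

-- ===== PORT A =====
-- A: loop i in range(0,6), append "1" when i == n else "0"
def createDoights (n : Int) : String :=
  (PySem.List.pyRange 0 6 1).foldl
    (fun doight i => if i = n then doight ++ "1" else doight ++ "0") ""

-- ===== PORT B =====
-- B (simpler): closed-form "0"*n + "1" + "0"*(5-n) when 0 ≤ n < 6, else "000000"
def createDoights_alt (n : Int) : String :=
  if 0 ≤ n ∧ n < 6 then
    String.ofList (List.replicate n.toNat '0') ++ "1" ++ String.ofList (List.replicate (5 - n).toNat '0')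
  else "000000"

-- ===== PRECONDITION & SPEC =====
def Spec_createDoights (n : Int) (out : String) : Prop := out = createDoights_alt n
instance (n : Int) (out : String) : Decidable (Spec_createDoights n out) := by unfold Spec_createDoights; infer_instance

-- ===== CLAIM (what is proved, stated in full; the proofs are below) =====
def Claim_equal_createDoights : Prop := ∀ (n : Int), Dom_createDoights n → Spec_createDoights n (createDoights n)

-- ===== LEMMAS AND PROOFS =====

-- ===== VERDICT (by name: the statement is the Claim_ definition above) =====
theorem createDoights_spec : Claim_equal_createDoights := by
  intro n _
  unfold Spec_createDoights
  by_cases h : 0 ≤ n ∧ n < 6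
  · obtain ⟨h1, h2⟩ := h
    interval_cases n <;> decide
  · have e : createDoights_alt n = "000000" := by
      simp [createDoights_alt, h]
    rw [e]
    have hr : PySem.List.pyRange 0 6 1 = [0, 1, 2, 3, 4, 5] := by decide
    simp only [createDoights, hr, List.foldl]
    split_ifs <;> first | omega | rfl
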